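-- pv_equiv track=rewrite | github.com/LogKul/CS301 | scrabble.py | word_in_tiles
-- ===== SOURCE A (Python) =====
-- def word_in_tiles(search_word, tiles):
--     counter = 0
--     word_char_list = list(search_word)
--     for letter in word_char_list:
--         if letter in tiles:
--             counter += 1
--     if counter == len(search_word):
--         return "The word '" + search_word + "' can be made with the given tiles."
--     else:
--         return "The word '" + search_word + "' can NOT be made with the given tiles."
-- ===== SOURCE B (Python) =====
-- def word_in_tiles(search_word, tiles):
--     if set(search_word) <= set(tiles):
--         return "The word '" + search_word + "' can be made with the given tiles."
--     else:
--         return "The word '" + search_word + "' can NOT be made with the given tiles."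
-- ===== Notes on version B (the rewrite author's own statement) =====
-- stated objective: simpler
-- what changed: Replaces the per-letter counting loop with its per-letter substring scan of tiles and the counter==len comparison by a single hash-set subset test set(search_word) <= set(tiles).
import Mathlib
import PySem

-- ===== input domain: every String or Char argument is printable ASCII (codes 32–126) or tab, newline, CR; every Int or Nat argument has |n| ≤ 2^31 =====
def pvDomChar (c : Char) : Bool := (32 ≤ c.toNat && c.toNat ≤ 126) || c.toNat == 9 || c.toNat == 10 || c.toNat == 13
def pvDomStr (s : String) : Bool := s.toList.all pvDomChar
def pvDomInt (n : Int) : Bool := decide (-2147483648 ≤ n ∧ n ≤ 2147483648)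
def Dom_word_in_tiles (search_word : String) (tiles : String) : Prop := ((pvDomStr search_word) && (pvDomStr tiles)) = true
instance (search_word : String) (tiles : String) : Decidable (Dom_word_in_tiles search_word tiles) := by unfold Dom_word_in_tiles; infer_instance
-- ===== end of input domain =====

-- B replaces A's per-letter counting loop and counter==len comparison with a single
-- set-subset test (simpler, same results).


-- ===== PORT A =====
-- 'letter in tiles' on a SINGLE character is exactly list membership of that
-- character in the string (single-char substring test).
def word_in_tiles (search_word : String) (tiles : String) : String :=
  let word_char_list : List Char := search_word.toList
  let counter : Int :=
    word_char_list.foldl (fun counter letter =>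
      if tiles.toList.contains letter then counter + 1 else counter) 0
  if counter = PySem.Str.len search_word then
    "The word '" ++ search_word ++ "' can be made with the given tiles."
  else
    "The word '" ++ search_word ++ "' can NOT be made with the given tiles."

-- ===== PORT B =====
def word_in_tiles_alt (search_word : String) (tiles : String) : String :=
  if PySem.Set.issubset (PySem.Set.ofList search_word.toList)
      (PySem.Set.ofList tiles.toList) then
    "The word '" ++ search_word ++ "' can be made with the given tiles."
  else
    "The word '" ++ search_word ++ "' can NOT be made with the given tiles."

-- ===== PRECONDITION & SPEC =====
def Spec_word_in_tiles (search_word : String) (tiles : String) (out : String) : Prop := out = word_in_tiles_alt search_word tiles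
instance (search_word : String) (tiles : String) (out : String) : Decidable (Spec_word_in_tiles search_word tiles out) := by unfold Spec_word_in_tiles; infer_instance

-- ===== CLAIM (what is proved, stated in full; the proofs are below) =====
def Claim_equal_word_in_tiles : Prop := ∀ (search_word : String) (tiles : String), Dom_word_in_tiles search_word tiles → Spec_word_in_tiles search_word tiles (word_in_tiles search_word tiles)

-- ===== LEMMAS AND PROOFS =====

-- A's counting loop is countP of the membership predicate.
theorem pv_foldl_count (tiles : List Char) (l : List Char) (c : Int) :
    l.foldl (fun counter letter =>
      if tiles.contains letter then counter + 1 else counter) c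
      = c + (l.countP (fun letter => tiles.contains letter) : Int) := by
  induction l generalizing c with
  | nil => simp
  | cons x xs ih =>
    simp only [List.foldl_cons, List.countP_cons, ih]
    split_ifs with h <;> simp <;> ring

theorem pv_cond_iff (search_word tiles : String) :
    ((search_word.toList.foldl (fun counter letter =>
        if tiles.toList.contains letter then counter + 1 else counter) (0 : Int))
      = PySem.Str.len search_word)
    ↔ PySem.Set.issubset (PySem.Set.ofList search_word.toList)
        (PySem.Set.ofList tiles.toList) = true := by
  rw [pv_foldl_count, PySem.Set.issubset_iff, PySem.Str.len_eq]
  constructor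
  · intro h x hx
    rw [PySem.Set.mem_ofList] at hx ⊢
    have hlen : search_word.toList.countP
        (fun letter => tiles.toList.contains letter) = search_word.toList.length := by
      omega
    have := (List.countP_eq_length).mp hlen x hx
    simpa using this
  · intro h
    have hlen : search_word.toList.countP
        (fun letter => tiles.toList.contains letter) = search_word.toList.length := by
      apply (List.countP_eq_length).mpr
      intro x hx
      simpa using h x (by rwa [PySem.Set.mem_ofList])
    omega

-- ===== VERDICT (by name: the statement is the Claim_ definition above) =====
theorem word_in_tiles_spec : Claim_equal_word_in_tiles := by
  intro search_word tiles _
  unfold Spec_word_in_tiles word_in_tiles word_in_tiles_alt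
  simp only []
  by_cases h : PySem.Set.issubset (PySem.Set.ofList search_word.toList)
      (PySem.Set.ofList tiles.toList) = true
  · rw [if_pos ((pv_cond_iff search_word tiles).mpr h), if_pos h]
  · rw [if_neg (fun hc => h ((pv_cond_iff search_word tiles).mp hc)),
        if_neg (by simpa using h)]
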